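-- pv_equiv track=rewrite | github.com/paulklemstine/factor | round3_advanced.py | fft_period_factor
-- ===== SOURCE A (Python) =====
-- import math
--
-- def fft_period_factor(n, sample_size=65536):
--     """
--     Compute x^2 mod n for consecutive x, then use FFT to find
--     the dominant frequency. The hidden periods are p and q.
--     We use a simple DFT at candidate frequencies near sqrt(n).
--     """
--     sqrt_n = math.isqrt(n)
--
--     # Compute the sequence
--     vals = []
--     for i in range(sample_size):
--         x = sqrt_n + i
--         vals.append((x * x) % n)
--
--     # Instead of full FFT (which would need the period to be < sample_size),
--     # test specific candidate periods by computing correlation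
--     # We test periods around common factor sizes
--     best_corr = 0
--     best_period = 0
--
--     # For small factors, try direct period testing
--     for period in range(2, min(sample_size // 4, 100000)):
--         # Correlation: count matches where vals[i] == vals[i + period]
--         matches = 0
--         checks = min(100, sample_size - period)
--         for i in range(checks):
--             if vals[i] == vals[i + period]:
--                 matches += 1
--         if matches > best_corr:
--             best_corr = matches
--             best_period = period
--
--         if matches >= 3:  # Strong signal
--             g = math.gcd(period, n)
--             if 1 < g < n:
--                 return g
--
--     if best_period > 0:
--         g = math.gcd(best_period, n)
--         if 1 < g < n:
--             return g
--     return None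
-- ===== SOURCE B (Python) =====
-- import math
--
-- def fft_period_factor(n, sample_size=65536):
--     """Same result as A, but instead of testing every candidate period with its own
--     100-element scan, index the first-100 values in a hash map, sweep the sequence
--     once collecting the match count of every colliding period into a flat table,
--     and let the candidate loop just read that table."""
--     sqrt_n = math.isqrt(n)
--     vals = [(sqrt_n + i) * (sqrt_n + i) % n for i in range(sample_size)]
--     limit = min(sample_size // 4, 100000)
--
--     # targets[v] = ascending list of indices i < min(100, sample_size) with vals[i] == v
--     targets = {}
--     for i in range(min(100, sample_size)):
--         targets.setdefault(vals[i], []).append(i)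
--
--     # counts[p] = number of i < min(100, sample_size) with vals[i] == vals[i + p],
--     # for 2 <= p < limit; p = j - i < limit needs j < limit + 100
--     counts = [0] * limit
--     for j in range(min(sample_size, limit + 100)):
--         for i in targets.get(vals[j], []):
--             p = j - i
--             if p < 2:
--                 break        # i ascending, so p only shrinks from here
--             if p < limit:
--                 counts[p] += 1
--
--     best_corr = 0
--     best_period = 0
--     for p in range(2, limit):
--         matches = counts[p]
--         if matches > best_corr:
--             best_corr = matches
--             best_period = p
--         if matches >= 3:
--             g = math.gcd(p, n)
--             if 1 < g < n:
--                 return g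
--
--     if best_period > 0:
--         g = math.gcd(best_period, n)
--         if 1 < g < n:
--             return g
--     return None
-- ===== Notes on version B (the rewrite author's own statement) =====
-- stated objective: faster
-- what changed: A correlates every candidate period with its own 100-element scan (~100*min(sample_size//4,100000) comparisons); B builds a hash index of the first 100 values, sweeps the sequence once collecting match counts only for periods that actually collide, and replays those candidate periods in increasing order.
import Mathlib
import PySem

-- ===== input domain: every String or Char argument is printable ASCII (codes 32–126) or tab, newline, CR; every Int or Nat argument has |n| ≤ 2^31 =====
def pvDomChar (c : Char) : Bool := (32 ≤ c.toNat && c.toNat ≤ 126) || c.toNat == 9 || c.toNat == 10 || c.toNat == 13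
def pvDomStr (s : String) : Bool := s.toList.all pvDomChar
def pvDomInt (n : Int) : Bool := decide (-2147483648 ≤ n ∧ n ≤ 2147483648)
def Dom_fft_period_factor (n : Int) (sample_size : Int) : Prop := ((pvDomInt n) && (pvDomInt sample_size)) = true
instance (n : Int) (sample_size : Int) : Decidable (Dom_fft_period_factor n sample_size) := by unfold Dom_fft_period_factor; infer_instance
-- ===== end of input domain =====

-- B replaces A's per-period 100-element correlation scans by a hash index of the
-- first-100 values: one sweep over the sequence collects the match count of every
-- colliding period into a flat table, which the candidate loop then just reads.

-- ===== PORT A =====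
-- vals[i] for the Python list 'vals': every index used below is provably ≥ 0 and in
-- range, and the Array mirrors Python's O(1) list indexing (a linear-time List lookup
-- would make the port unevaluable at sample_size ≈ 65536)
def pvAget (vals : Array Int) (i : Int) : Int := vals.getD i.toNat 0

-- 'for i in range(checks): if vals[i] == vals[i + period]: matches += 1'
def pvCMgo (vals : Array Int) (p checks i m : Int) : Int :=
  if i < checks then
    pvCMgo vals p checks (i + 1) (if pvAget vals i == pvAget vals (i + p) then m + 1 else m)
  else m
termination_by (checks - i).toNat
decreasing_by omega

def pvCountMatches (vals : Array Int) (p checks : Int) : Int := pvCMgo vals p checks 0 0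

def pvLoopA (n ss : Int) (vals : Array Int) : List Int → Int → Int → Option Int
  | [], _, bp =>
      -- the code after A's period loop (reached when the loop does not return)
      if bp > 0 then
        let g : Int := Int.gcd bp n
        if 1 < g ∧ g < n then some g else none
      else none
  | p :: rest, bc, bp =>
      let checks := min 100 (ss - p)
      let mtc := pvCountMatches vals p checks
      let bc' := if mtc > bc then mtc else bc
      let bp' := if mtc > bc then p else bp
      if mtc ≥ 3 then
        let g : Int := Int.gcd p n
        if 1 < g ∧ g < n then some g else pvLoopA n ss vals rest bc' bp'
      else pvLoopA n ss vals rest bc' bp'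

def fft_period_factor (n : Int) (sample_size : Int) : Option Int :=
  let sqrt_n : Int := Int.sqrt n    -- math.isqrt (exact for n ≥ 0; n < 0 raises, outside Pre_)
  let vals : Array Int := ((PySem.List.pyRange 0 sample_size 1).map
      (fun i => PySem.Int.mod ((sqrt_n + i) * (sqrt_n + i)) n)).toArray
  pvLoopA n sample_size vals
    (PySem.List.pyRange 2 (min (PySem.Int.floordiv sample_size 4) 100000) 1) 0 0

-- ===== PORT B =====
-- targets[v] = ascending list of indices i < min(100, sample_size) with vals[i] == v
def pvTargets (vals : Array Int) (m : Int) : PySem.Dict Int (List Int) :=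
  (PySem.List.pyRange 0 m 1).foldl
    (fun d i => d.modify (pvAget vals i) [] (· ++ [i])) PySem.Dict.empty

-- inner loop over targets.get(vals[j], []) with its break (i ascending ⇒ p descending);
-- counts[p] += 1 happens only under 2 ≤ p < limit, so the index is always in range
def pvCollide (limit j : Int) : List Int → Array Int → Array Int
  | [], c => c
  | i :: rest, c =>
      let p := j - i
      if p < 2 then c
      else pvCollide limit j rest (if p < limit then c.modify p.toNat (· + 1) else c)

def pvCounts (vals : Array Int) (ss limit : Int) (targets : PySem.Dict Int (List Int)) :
    Array Int :=
  (PySem.List.pyRange 0 (min ss (limit + 100)) 1).foldl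
    (fun c j => pvCollide limit j (targets.getD (pvAget vals j) []) c)
    (Array.replicate limit.toNat 0)    -- [0] * limit  (empty when limit ≤ 0)

def pvLoopB (n : Int) (counts : Array Int) : List Int → Int → Int → Option Int
  | [], _, bp =>
      if bp > 0 then
        let g : Int := Int.gcd bp n
        if 1 < g ∧ g < n then some g else none
      else none
  | p :: rest, bc, bp =>
      let mtc := pvAget counts p
      let bc' := if mtc > bc then mtc else bc
      let bp' := if mtc > bc then p else bp
      if mtc ≥ 3 then
        let g : Int := Int.gcd p n
        if 1 < g ∧ g < n then some g else pvLoopB n counts rest bc' bp'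
      else pvLoopB n counts rest bc' bp'

def fft_period_factor_alt (n : Int) (sample_size : Int) : Option Int :=
  let sqrt_n : Int := Int.sqrt n
  let vals : Array Int := ((PySem.List.pyRange 0 sample_size 1).map
      (fun i => PySem.Int.mod ((sqrt_n + i) * (sqrt_n + i)) n)).toArray
  let limit : Int := min (PySem.Int.floordiv sample_size 4) 100000
  let targets := pvTargets vals (min 100 sample_size)
  let counts := pvCounts vals sample_size limit targets
  pvLoopB n counts (PySem.List.pyRange 2 limit 1) 0 0

-- ===== PRECONDITION & SPEC =====
-- Pre_ excludes exactly the inputs where Python A raises: n < 0 (math.isqrt ValueError)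
-- and n = 0 with sample_size ≥ 1 (ZeroDivisionError in '% n'); B raises there too.
def Pre_fft_period_factor (n : Int) (sample_size : Int) : Prop :=
  0 < n ∨ (n = 0 ∧ sample_size ≤ 0)
instance (n : Int) (sample_size : Int) : Decidable (Pre_fft_period_factor n sample_size) := by
  unfold Pre_fft_period_factor; infer_instance

def pvWitness_fft_period_factor : Int × Int := (15, 16)

def Spec_fft_period_factor (n : Int) (sample_size : Int) (out : Option Int) : Prop :=
  out = fft_period_factor_alt n sample_size
instance (n : Int) (sample_size : Int) (out : Option Int) : Decidable (Spec_fft_period_factor n sample_size out) := by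
  unfold Spec_fft_period_factor; infer_instance

-- ===== CLAIM (what is proved, stated in full; the proofs are below) =====
def Claim_equal_fft_period_factor : Prop := ∀ (n : Int) (sample_size : Int), Dom_fft_period_factor n sample_size → Pre_fft_period_factor n sample_size → Spec_fft_period_factor n sample_size (fft_period_factor n sample_size)

-- ===== LEMMAS AND PROOFS =====

-- A's correlation count as a countP
theorem pvCMgo_eq (vals : Array Int) (p checks : Int) :
    ∀ (k : Nat) (i m : Int), (checks - i).toNat = k →
      pvCMgo vals p checks i m
        = m + ((PySem.List.pyRange i checks 1).countP
            (fun x => pvAget vals x == pvAget vals (x + p)) : Int) := by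
  intro k
  induction k using Nat.strong_induction_on with
  | _ k ih =>
    intro i m hk
    by_cases h : i < checks
    · rw [show pvCMgo vals p checks i m
          = pvCMgo vals p checks (i + 1)
              (if pvAget vals i == pvAget vals (i + p) then m + 1 else m) from by
        rw [pvCMgo]; simp [h]]
      rw [ih (checks - (i + 1)).toNat (by omega) (i + 1) _ rfl]
      rw [PySem.List.pyRange_one_cons h, List.countP_cons]
      by_cases he : pvAget vals i == pvAget vals (i + p)
      · simp only [he, if_pos]
        push_cast
        ring
      · simp only [he]
        push_cast
        simp
    · rw [pvCMgo]
      rw [if_neg h, PySem.List.pyRange_one_eq_nil (by omega)]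
      simp

theorem pvCountMatches_eq_countP (vals : Array Int) (p c : Int) :
    pvCountMatches vals p c =
      ((PySem.List.pyRange 0 c 1).countP
        (fun i => pvAget vals i == pvAget vals (i + p)) : Int) := by
  unfold pvCountMatches
  rw [pvCMgo_eq vals p c (c - 0).toNat 0 0 rfl]
  simp

-- targets characterization
theorem pvTargets_getD (vals : Array Int) (m v : Int) :
    (pvTargets vals m).getD v []
      = (PySem.List.pyRange 0 m 1).filter (fun i => pvAget vals i == v) := by
  unfold pvTargets
  rw [← List.foldl_map (f := fun i : Int => (pvAget vals i, i))
      (g := fun (d : PySem.Dict Int (List Int)) (q : Int × Int) => d.modify q.1 [] (· ++ [q.2]))]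
  rw [PySem.Dict.getD_foldl_modify_append]
  rw [List.filter_map]
  rw [List.map_map]
  simp [Function.comp_def]

-- pvCollide's break-loop as takeWhile + filter + map folded into the count table
theorem pvCollide_eq (limit j : Int) (lst : List Int) (c : Array Int) :
    pvCollide limit j lst c
      = ((((lst.takeWhile (fun i => decide (2 ≤ j - i))).filter
            (fun i => decide (j - i < limit))).map (fun i => j - i)).foldl
          (fun c x => c.modify x.toNat (· + 1)) c) := by
  induction lst generalizing c with
  | nil => simp [pvCollide]
  | cons i rest ih =>
    by_cases h : j - i < 2
    · have : ¬ ((2:Int) ≤ j - i) := by omega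
      simp [pvCollide, h, this]
    · have h2 : (2:Int) ≤ j - i := by omega
      rw [show pvCollide limit j (i :: rest) c
          = pvCollide limit j rest (if j - i < limit then c.modify (j - i).toNat (· + 1) else c) by
        simp [pvCollide, h]]
      rw [List.takeWhile_cons]
      simp only [h2, decide_true, if_true]
      by_cases hl : j - i < limit
      · simp only [List.filter_cons, hl, decide_true, if_true, List.map_cons, List.foldl_cons]
        exact ih _
      · simp only [List.filter_cons, hl, decide_false]
        exact ih _

-- break = takeWhile = filter on an ascending index list
theorem pv_takeWhile_eq_filter (j : Int) (lst : List Int) (h : lst.Pairwise (· < ·)) :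
    lst.takeWhile (fun i => decide (2 ≤ j - i)) = lst.filter (fun i => decide (2 ≤ j - i)) := by
  induction lst with
  | nil => rfl
  | cons i rest ih =>
    rcases List.pairwise_cons.mp h with ⟨hfst, hrest⟩
    by_cases hp : (2:Int) ≤ j - i
    · simp [hp, ih hrest]
    · have hnil : rest.filter (fun i => decide (2 ≤ j - i)) = [] := by
        rw [List.filter_eq_nil_iff]
        intro x hx
        have hix := hfst x hx
        simp only [decide_eq_true_eq]
        omega
      simp [hp, hnil]

-- the counting fold keeps the table's size
theorem pv_size_foldl_modify (xs : List Int) (c : Array Int) :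
    (xs.foldl (fun c x => c.modify x.toNat (· + 1)) c).size = c.size := by
  induction xs generalizing c with
  | nil => rfl
  | cons x t ih => rw [List.foldl_cons, ih, Array.size_modify]

-- value of one cell after a fold of increments (indices are nonnegative, cell in range)
theorem pv_getD_foldl_modify (xs : List Int) (c : Array Int) (q : Int) (hq : 0 ≤ q)
    (hsz : q.toNat < c.size) (hxs : ∀ x ∈ xs, 0 ≤ x) :
    (xs.foldl (fun c x => c.modify x.toNat (· + 1)) c).getD q.toNat 0
      = c.getD q.toNat 0 + (List.count q xs : Int) := by
  induction xs generalizing c with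
  | nil => simp
  | cons x t ih =>
    rw [List.foldl_cons,
      ih _ (by rw [Array.size_modify]; exact hsz) (fun y hy => hxs y (List.mem_cons_of_mem x hy)),
      List.count_cons]
    have hx0 : 0 ≤ x := hxs x List.mem_cons_self
    have hcell : (c.modify x.toNat (· + 1)).getD q.toNat 0
        = c.getD q.toNat 0 + (if (x == q) = true then (1:Int) else 0) := by
      rw [Array.getD_eq_getD_getElem?, Array.getD_eq_getD_getElem?, Array.getElem?_modify]
      by_cases hxq : x = q
      · subst hxq
        rw [if_pos rfl, Array.getElem?_eq_getElem hsz]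
        simp
      · have : x.toNat ≠ q.toNat := by omega
        rw [if_neg this]
        simp [hxq]
    rw [hcell]
    push_cast
    ring

-- value of one cell after the whole nested counting fold
theorem pv_getD_collect (L : Int → List Int) (js : List Int) (c : Array Int) (q : Int)
    (hq : 0 ≤ q) (hsz : q.toNat < c.size) (hL : ∀ j : Int, ∀ x ∈ L j, 0 ≤ x) :
    (js.foldl (fun c j => (L j).foldl (fun c x => c.modify x.toNat (· + 1)) c) c).getD q.toNat 0
      = c.getD q.toNat 0 + ((js.map (fun j => (List.count q (L j) : Int))).sum) := by
  induction js generalizing c with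
  | nil => simp
  | cons j t ih =>
    simp only [List.foldl_cons, List.map_cons, List.sum_cons]
    rw [ih _ (by rw [pv_size_foldl_modify]; exact hsz),
      pv_getD_foldl_modify _ _ _ hq hsz (hL j)]
    ring

-- count of a fixed period q in one collision list
theorem pv_count_collide (vals : Array Int) (m limit j q : Int) :
    List.count q (((((pvTargets vals m).getD (pvAget vals j) []).takeWhile
          (fun i => decide (2 ≤ j - i))).filter (fun i => decide (j - i < limit))).map
        (fun i => j - i))
      = if 2 ≤ q ∧ q < limit ∧ 0 ≤ j - q ∧ j - q < m ∧
            pvAget vals (j - q) = pvAget vals j then 1 else 0 := by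
  rw [pvTargets_getD]
  have hpw0 : ((PySem.List.pyRange 0 m 1).filter
      (fun i => pvAget vals i == pvAget vals j)).Pairwise (· < ·) :=
    (PySem.List.pairwise_lt_pyRange_one 0 m).filter _
  rw [pv_takeWhile_eq_filter j _ hpw0]
  have hpw : ((((PySem.List.pyRange 0 m 1).filter
      (fun i => pvAget vals i == pvAget vals j)).filter
      (fun i => decide (2 ≤ j - i))).filter (fun i => decide (j - i < limit))).Pairwise (· < ·) :=
    (hpw0.filter _).filter _
  have hnd : (((((PySem.List.pyRange 0 m 1).filter
      (fun i => pvAget vals i == pvAget vals j)).filter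
      (fun i => decide (2 ≤ j - i))).filter (fun i => decide (j - i < limit))).map
      (fun i => j - i)).Nodup := by
    refine List.Nodup.map ?_ (hpw.imp (fun hab => ne_of_lt hab))
    intro a b hab
    have h' : j - a = j - b := hab
    omega
  have hmem : q ∈ ((((PySem.List.pyRange 0 m 1).filter
      (fun i => pvAget vals i == pvAget vals j)).filter
      (fun i => decide (2 ≤ j - i))).filter (fun i => decide (j - i < limit))).map
      (fun i => j - i) ↔
      (2 ≤ q ∧ q < limit ∧ 0 ≤ j - q ∧ j - q < m ∧
        pvAget vals (j - q) = pvAget vals j) := by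
    simp only [List.mem_map, List.mem_filter, PySem.List.mem_pyRange_one,
      decide_eq_true_eq, beq_iff_eq]
    constructor
    · rintro ⟨i, ⟨⟨⟨⟨hi0, him⟩, hval⟩, h2⟩, hlt⟩, rfl⟩
      exact ⟨h2, hlt, by omega, by omega, by simpa [show j - (j - i) = i by ring] using hval⟩
    · rintro ⟨h2, hlt, h0, hm2, hval⟩
      exact ⟨j - q, ⟨⟨⟨⟨by omega, by omega⟩, hval⟩, by omega⟩, by omega⟩, by ring⟩
  by_cases hc : 2 ≤ q ∧ q < limit ∧ 0 ≤ j - q ∧ j - q < m ∧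
      pvAget vals (j - q) = pvAget vals j
  · rw [if_pos hc]; exact List.count_eq_one_of_mem hnd (hmem.mpr hc)
  · rw [if_neg hc]; exact List.count_eq_zero.mpr (fun h => hc (hmem.mp h))

-- shifting a countP over a pyRange
theorem pv_countP_pyRange_shift (p : Int → Bool) (a b t : Int) :
    (PySem.List.pyRange (a + t) (b + t) 1).countP p
      = (PySem.List.pyRange a b 1).countP (fun i => p (i + t)) := by
  rw [PySem.List.pyRange_one (a + t) (b + t), PySem.List.pyRange_one a b,
    List.countP_map, List.countP_map]
  have harg : (b + t - (a + t)) = b - a := by ring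
  rw [harg]
  apply List.countP_congr
  intro k _
  have : a + t + (k : Int) = a + k + t := by ring
  simp [this]

-- the table built by B holds exactly A's per-period correlation counts
theorem pv_counts_getD (vals : Array Int) (ss limit q : Int)
    (hlim : limit ≤ PySem.Int.floordiv ss 4) (hq2 : 2 ≤ q) (hqlim : q < limit) :
    (pvCounts vals ss limit (pvTargets vals (min 100 ss))).getD q.toNat 0
      = pvCountMatches vals q (min 100 (ss - q)) := by
  unfold pvCounts
  simp only [pvCollide_eq]
  rw [pv_getD_collect (fun j =>
      ((((pvTargets vals (min 100 ss)).getD (pvAget vals j) []).takeWhile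
          (fun i => decide (2 ≤ j - i))).filter (fun i => decide (j - i < limit))).map
        (fun i => j - i))
    _ _ _ (by omega) (by rw [Array.size_replicate]; omega) ?hL]
  case hL =>
    intro j x hx
    rcases List.mem_map.mp hx with ⟨i, hi, rfl⟩
    have h2 := List.mem_takeWhile_imp (p := fun i : Int => decide (2 ≤ j - i))
      (List.mem_filter.mp hi).1
    have h3 : (2:Int) ≤ j - i := of_decide_eq_true h2
    omega
  have hinit : (Array.replicate limit.toNat (0:Int)).getD q.toNat 0 = 0 := by
    rw [Array.getD_eq_getD_getElem?, Array.getElem?_replicate]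
    split <;> rfl
  rw [hinit, zero_add]
  simp only [pv_count_collide]
  rw [show (fun (j : Int) => ((if 2 ≤ q ∧ q < limit ∧ 0 ≤ j - q ∧ j - q < min 100 ss ∧
        pvAget vals (j - q) = pvAget vals j then (1:Nat) else 0 : Nat) : Int))
      = (fun j => if (decide (2 ≤ q ∧ q < limit ∧ 0 ≤ j - q ∧ j - q < min 100 ss ∧
        pvAget vals (j - q) = pvAget vals j)) = true then (1:Int) else 0)
    from funext fun j => by simp]
  rw [PySem.List.sum_map_ite_one_zero]
  have hss : (q + 1) * 4 ≤ ss :=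
    (PySem.Int.le_floordiv_iff_mul_le (by omega)).mp (le_trans (by omega) hlim)
  have hsplit : PySem.List.pyRange 0 (min ss (limit + 100)) 1
      = (PySem.List.pyRange 0 q 1 ++ PySem.List.pyRange q (q + min 100 (ss - q)) 1)
        ++ PySem.List.pyRange (q + min 100 (ss - q)) (min ss (limit + 100)) 1 := by
    rw [← PySem.List.pyRange_one_append 0 q (q + min 100 (ss - q)) (by omega) (by omega),
      ← PySem.List.pyRange_one_append 0 (q + min 100 (ss - q)) (min ss (limit + 100))
        (by omega) (by omega)]
  rw [hsplit, List.countP_append, List.countP_append]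
  have h1 : (PySem.List.pyRange 0 q 1).countP (fun j => decide (2 ≤ q ∧ q < limit ∧
      0 ≤ j - q ∧ j - q < min 100 ss ∧ pvAget vals (j - q) = pvAget vals j)) = 0 := by
    rw [List.countP_eq_zero]
    intro j hj
    rw [PySem.List.mem_pyRange_one] at hj
    simp only [decide_eq_true_eq, not_and]
    intro _ _ h0; omega
  have h3 : (PySem.List.pyRange (q + min 100 (ss - q)) (min ss (limit + 100)) 1).countP
      (fun j => decide (2 ≤ q ∧ q < limit ∧ 0 ≤ j - q ∧ j - q < min 100 ss ∧
      pvAget vals (j - q) = pvAget vals j)) = 0 := by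
    rw [List.countP_eq_zero]
    intro j hj
    rw [PySem.List.mem_pyRange_one] at hj
    simp only [decide_eq_true_eq, not_and]
    intro _ _ _ hm2; omega
  rw [h1, h3]
  have hshift : (PySem.List.pyRange q (q + min 100 (ss - q)) 1).countP
      (fun j => decide (2 ≤ q ∧ q < limit ∧ 0 ≤ j - q ∧ j - q < min 100 ss ∧
        pvAget vals (j - q) = pvAget vals j))
      = (PySem.List.pyRange 0 (min 100 (ss - q)) 1).countP
        (fun i => decide (2 ≤ q ∧ q < limit ∧ 0 ≤ i + q - q ∧ i + q - q < min 100 ss ∧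
          pvAget vals (i + q - q) = pvAget vals (i + q))) := by
    have := pv_countP_pyRange_shift (fun j => decide (2 ≤ q ∧ q < limit ∧
        0 ≤ j - q ∧ j - q < min 100 ss ∧
        pvAget vals (j - q) = pvAget vals j)) 0 (min 100 (ss - q)) q
    rw [show (0:Int) + q = q by ring,
      show min 100 (ss - q) + q = q + min 100 (ss - q) by ring] at this
    rw [this]
  rw [hshift]
  rw [pvCountMatches_eq_countP]
  simp only [Nat.zero_add, Nat.add_zero]
  congr 1
  apply List.countP_congr
  intro i hi
  rw [PySem.List.mem_pyRange_one] at hi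
  have hiq : i + q - q = i := by ring
  simp only [hiq, decide_eq_true_eq, beq_iff_eq]
  constructor
  · rintro ⟨_, _, _, _, h⟩; exact h
  · intro h; exact ⟨hq2, hqlim, by omega, by omega, h⟩

-- the candidate loop reads from the table exactly what A recomputes per period
theorem pv_loop_eq (n ss : Int) (vals : Array Int) (counts : Array Int) :
    ∀ (l : List Int) (bc bp : Int),
      (∀ p ∈ l, pvAget counts p = pvCountMatches vals p (min 100 (ss - p))) →
      pvLoopA n ss vals l bc bp = pvLoopB n counts l bc bp := by
  intro l
  induction l with
  | nil => intro bc bp _; rfl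
  | cons p t ih =>
    intro bc bp hm
    have hp := hm p List.mem_cons_self
    have ht : ∀ bc' bp' : Int, pvLoopA n ss vals t bc' bp' = pvLoopB n counts t bc' bp' :=
      fun bc' bp' => ih bc' bp' (fun x hx => hm x (List.mem_cons_of_mem p hx))
    simp only [pvLoopA, pvLoopB, hp]
    split_ifs <;> first
      | rfl
      | apply ht

-- the two ports agree on every input
theorem pv_ports_eq (n ss : Int) : fft_period_factor n ss = fft_period_factor_alt n ss := by
  unfold fft_period_factor fft_period_factor_alt
  simp only []
  set sqrt_n : Int := Int.sqrt n with hsq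
  set vals : Array Int := ((PySem.List.pyRange 0 ss 1).map
    (fun i => PySem.Int.mod ((sqrt_n + i) * (sqrt_n + i)) n)).toArray with hvals
  set limit : Int := min (PySem.Int.floordiv ss 4) 100000 with hlimit
  set counts := pvCounts vals ss limit (pvTargets vals (min 100 ss)) with hcounts
  have hlim : limit ≤ PySem.Int.floordiv ss 4 := min_le_left _ _
  have hmatch : ∀ p ∈ PySem.List.pyRange 2 limit 1,
      pvAget counts p = pvCountMatches vals p (min 100 (ss - p)) := by
    intro p hpmem
    rw [PySem.List.mem_pyRange_one] at hpmem
    show counts.getD p.toNat 0 = _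
    rw [hcounts]
    exact pv_counts_getD vals ss limit p hlim hpmem.1 hpmem.2
  exact pv_loop_eq n ss vals counts (PySem.List.pyRange 2 limit 1) 0 0 hmatch

-- ===== VERDICT (by name: the statement is the Claim_ definition above) =====
theorem fft_period_factor_spec : Claim_equal_fft_period_factor := by
  intro n sample_size _ _
  unfold Spec_fft_period_factor
  exact pv_ports_eq n sample_size
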